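-- pv_equiv track=rewrite | github.com/justine-george/DSA-LeetCode-Repository | 2490-maximum-number-of-books-you-can-take/maximum-number-of-books-you-can-take.py | maximumBooks
-- ===== SOURCE A (Python) =====
-- from typing import List
--
-- def maximumBooks(books: List[int]) -> int:
--     """
--     # index: count of books
--     4: books[i]
--     3: (books[i] - 1) or greater books should be there
--     2: (books[i] - 2) or greater books should be there
--     1: (books[i] - 3) or greater books should be there
--     ..
--     j: (books[i] - (i - j)) or greater books should be there
--
--     so, at index j( < i), if books[j] < books[i] - (i - j), it means there isn't enough books here.
--     ie. books[j] - j < books[i] - i is the breaking condition.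
--     => [j + 1, i] is an AP. (calculate sum in O(1))
--     AP sum = 1/2(first+last)*number of elems
--
--     dp[i] = max # of books we can take from all the shelves [0, i], when we take books[i] from ith shelf
--
--     [j + 1, i] -> calculateSum(j + 1, i)
--     but what is [0, j]? it is actually dp[j]
--     => dp[i] = (dp[j] if j exists else 0) + calculateSum(j + 1, i) if last is not negative, else
--        dp[i] = calculateSum(0, i) ie. book[i]*(book[i] + 1)//2
--     """
--     #  T: O(n), S: O(n)
--     res = 0
--     dp = [0] * len(books)
--     stack = []
--
--     f = lambda i: books[i] - i
--
--     for i, book in enumerate(books):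
--         # because index i will run out of items first
--         while stack and stack[-1][0] >= f(i):
--             stack.pop()
--
--         j = stack[-1][1] if stack else -1
--
--         first = book
--         last = book - (i - (j + 1))
--
--         if last < 0:
--             dp[i] = first * (first + 1) // 2
--         else:
--             count = i - j
--             dp[i] = (dp[j] if j >= 0 else 0) + ((first + last) * count // 2)
--
--         stack.append((f(i), i))
--         res = max(res, dp[i])
--
--     return res
-- ===== SOURCE B (Python) =====
-- from typing import List
--
-- def maximumBooks(books: List[int]) -> int:
--     # Same dp recurrence, but j is found by a plain backward scan
--     # (nearest k < i with books[k]-k < books[i]-i) instead of a monotonic stack,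
--     # and dp grows by append instead of preallocation.
--     res = 0
--     dp = []
--     for i in range(len(books)):
--         first = books[i]
--         fi = first - i
--         j = -1
--         for k in range(i - 1, -1, -1):
--             if books[k] - k < fi:
--                 j = k
--                 break
--         last = first - (i - (j + 1))
--         if last < 0:
--             cur = first * (first + 1) // 2
--         else:
--             cur = (dp[j] if j >= 0 else 0) + (first + last) * (i - j) // 2
--         dp.append(cur)
--         res = max(res, cur)
--     return res
-- ===== Notes on version B (the rewrite author's own statement) =====
-- stated objective: simpler
-- what changed: Replaces the monotonic stack with a plain backward scan that finds, for each shelf, the nearest previous index k with books[k]-k < books[i]-i; same dp recurrence, dp grown by append.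
import Mathlib
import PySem

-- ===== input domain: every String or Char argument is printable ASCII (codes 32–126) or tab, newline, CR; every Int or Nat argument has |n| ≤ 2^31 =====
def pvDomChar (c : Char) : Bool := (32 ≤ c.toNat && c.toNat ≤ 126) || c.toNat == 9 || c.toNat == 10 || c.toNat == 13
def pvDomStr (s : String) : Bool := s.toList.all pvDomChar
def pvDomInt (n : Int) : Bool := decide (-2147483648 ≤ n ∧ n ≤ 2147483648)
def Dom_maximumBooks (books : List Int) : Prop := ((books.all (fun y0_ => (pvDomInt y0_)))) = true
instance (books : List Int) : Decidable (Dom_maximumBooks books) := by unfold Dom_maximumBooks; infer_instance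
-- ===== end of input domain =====

-- B replaces A's monotonic stack by a direct backward scan for the nearest valid break index; same values proved equal.

-- ===== PORT A =====
-- f = lambda i: books[i] - i   (i always in range, so getD is exact)
def pvFA (books : List Int) (i : Nat) : Int := books.getD i 0 - (i : Int)

-- loop body of A: state is (res, dp, stack), stack head = Python stack top
def pvStepA (books : List Int) (st : Int × List Int × List (Int × Int)) (i : Nat) :
    Int × List Int × List (Int × Int) :=
  let res := st.1
  let dp := st.2.1
  let stack := st.2.2
  let fi := pvFA books i
  -- while stack and stack[-1][0] >= f(i): stack.pop()
  let stack1 := stack.dropWhile (fun p => decide (fi ≤ p.1))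
  -- j = stack[-1][1] if stack else -1
  let j : Int := match stack1 with | [] => -1 | p :: _ => p.2
  let first := books.getD i 0
  let last := first - ((i : Int) - (j + 1))
  let dpi := if last < 0 then PySem.Int.floordiv (first * (first + 1)) 2
             else (if 0 ≤ j then dp.getD j.toNat 0 else 0) +
                  PySem.Int.floordiv ((first + last) * ((i : Int) - j)) 2
  let dp1 := dp.set i dpi
  (max res (dp1.getD i 0), dp1, (fi, (i : Int)) :: stack1)

def maximumBooks (books : List Int) : Int :=
  ((List.range books.length).foldl (pvStepA books) (0, List.replicate books.length 0, [])).1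

-- ===== PORT B =====
-- backward scan with break: first k in i-1, i-2, …, 0 with books[k]-k < fi, else -1
def pvFindJ (books : List Int) (fi : Int) : Nat → Int
  | 0 => -1
  | k + 1 => if books.getD k 0 - (k : Int) < fi then (k : Int) else pvFindJ books fi k

def pvStepB (books : List Int) (st : Int × List Int) (i : Nat) : Int × List Int :=
  let res := st.1
  let dp := st.2
  let first := books.getD i 0
  let fi := first - (i : Int)
  let j := pvFindJ books fi i
  let last := first - ((i : Int) - (j + 1))
  let cur := if last < 0 then PySem.Int.floordiv (first * (first + 1)) 2
             else (if 0 ≤ j then dp.getD j.toNat 0 else 0) +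
                  PySem.Int.floordiv ((first + last) * ((i : Int) - j)) 2
  (max res cur, dp ++ [cur])

def maximumBooks_alt (books : List Int) : Int :=
  ((List.range books.length).foldl (pvStepB books) (0, [])).1

-- ===== PRECONDITION & SPEC =====
def Spec_maximumBooks (books : List Int) (out : Int) : Prop := out = maximumBooks_alt books
instance (books : List Int) (out : Int) : Decidable (Spec_maximumBooks books out) := by unfold Spec_maximumBooks; infer_instance

-- ===== CLAIM (what is proved, stated in full; the proofs are below) =====
def Claim_equal_maximumBooks : Prop := ∀ (books : List Int), Dom_maximumBooks books → Spec_maximumBooks books (maximumBooks books)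

-- ===== LEMMAS AND PROOFS =====

-- the monotonic-stack invariant after the first i iterations of A's loop
def pvInv (books : List Int) (i : Nat) (stack : List (Int × Int)) : Prop :=
  (∀ p ∈ stack, p.1 = pvFA books p.2.toNat ∧ 0 ≤ p.2 ∧ p.2 < (i : Int)) ∧
  stack.Pairwise (fun a b => b.2 < a.2) ∧
  (∀ k : Nat, k < i → ∃ p ∈ stack, (k : Int) ≤ p.2 ∧ p.1 ≤ pvFA books k)

-- relation between A's and B's loop states after i iterations
def pvRel (books : List Int) (i : Nat) (sA : Int × List Int × List (Int × Int)) (sB : Int × List Int) : Prop :=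
  sA.1 = sB.1 ∧ sA.2.1 = sB.2 ++ List.replicate (books.length - i) 0 ∧ sB.2.length = i ∧
  pvInv books i sA.2.2

theorem pvFindJ_none (books : List Int) (fi : Int) (i : Nat)
    (h : ∀ k : Nat, k < i → ¬ (pvFA books k < fi)) : pvFindJ books fi i = -1 := by
  induction i with
  | zero => rfl
  | succ k ih =>
      have hk := h k (Nat.lt_succ_self k)
      show (if books.getD k 0 - (k : Int) < fi then (k : Int) else pvFindJ books fi k) = -1
      rw [if_neg (by simpa [pvFA] using hk)]
      exact ih fun m hm => h m (Nat.lt_succ_of_lt hm)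

theorem pvFindJ_some (books : List Int) (fi : Int) (i j : Nat)
    (hj : j < i) (hlt : pvFA books j < fi)
    (h : ∀ k : Nat, j < k → k < i → ¬ (pvFA books k < fi)) :
    pvFindJ books fi i = (j : Int) := by
  induction i with
  | zero => omega
  | succ k ih =>
      show (if books.getD k 0 - (k : Int) < fi then (k : Int) else pvFindJ books fi k) = (j : Int)
      by_cases hk : j = k
      · subst hk
        rw [if_pos (by simpa [pvFA] using hlt)]
      · have hjk : j < k := by omega
        have hnot := h k hjk (Nat.lt_succ_self k)
        rw [if_neg (by simpa [pvFA] using hnot)]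
        exact ih hjk fun m hm hm' => h m hm (Nat.lt_succ_of_lt hm')

theorem pvStep_rel (books : List Int) (i : Nat) (hi : i < books.length)
    (sA : Int × List Int × List (Int × Int)) (sB : Int × List Int)
    (h : pvRel books i sA sB) :
    pvRel books (i + 1) (pvStepA books sA i) (pvStepB books sB i) := by
  obtain ⟨hres, hdp, hlen, hmem, hpair, hcov⟩ := h
  set stack := sA.2.2 with hst
  set fi := pvFA books i with hfi
  set stack1 := stack.dropWhile (fun p => decide (fi ≤ p.1)) with hs1
  have hsub : ∀ p ∈ stack1, p ∈ stack := fun p hp =>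
    (List.dropWhile_sublist _).subset hp
  have hsplit : stack.takeWhile (fun p => decide (fi ≤ p.1)) ++ stack1 = stack :=
    List.takeWhile_append_dropWhile
  have htake : ∀ p ∈ stack.takeWhile (fun p => decide (fi ≤ p.1)), fi ≤ p.1 := by
    intro p hp
    have := List.mem_takeWhile_imp hp
    simpa using this
  -- the popped-or-kept split of the stack
  have hmemsplit : ∀ p ∈ stack, p ∈ stack.takeWhile (fun p => decide (fi ≤ p.1)) ∨ p ∈ stack1 := by
    intro p hp
    rw [← hsplit] at hp
    exact List.mem_append.mp hp
  -- j computed by A equals j computed by B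
  have hj : (match stack1 with | [] => (-1 : Int) | p :: _ => p.2) = pvFindJ books fi i := by
    cases hq : stack1 with
    | nil =>
        refine (pvFindJ_none books fi i ?_).symm
        intro k hk hklt
        obtain ⟨p, hp, hkle, hple⟩ := hcov k hk
        rcases hmemsplit p hp with hin | hin
        · exact absurd (lt_of_le_of_lt hple hklt) (not_lt.mpr (htake p hin))
        · rw [hq] at hin; simp at hin
    | cons q rest =>
        have hqmem : q ∈ stack := hsub q (by rw [hq]; exact List.mem_cons_self)
        obtain ⟨hqf, hq0, hqi⟩ := hmem q hqmem
        have hqlt : q.1 < fi := by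
          have := List.head?_dropWhile_not (fun p => decide (fi ≤ p.1)) stack
          rw [← hs1, hq] at this
          simpa using this
        have hcast : ((q.2.toNat : Int)) = q.2 := Int.toNat_of_nonneg hq0
        have hji : q.2.toNat < i := by omega
        refine Eq.symm ?_
        have := pvFindJ_some books fi i q.2.toNat hji (by rw [← hqf]; exact hqlt) ?_
        · rw [this, hcast]
        · intro k hk hklt hkfi
          obtain ⟨p, hp, hkle, hple⟩ := hcov k hklt
          rcases hmemsplit p hp with hin | hin
          · exact absurd (lt_of_le_of_lt hple hkfi) (not_lt.mpr (htake p hin))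
          · -- p is in stack1 = q :: rest, but its index would exceed or equal k > q.2
            rw [hq] at hin
            rcases List.mem_cons.mp hin with rfl | hin
            · omega
            · have : p.2 < q.2 := by
                have hpw : stack1.Pairwise (fun a b => b.2 < a.2) :=
                  hpair.sublist (List.dropWhile_sublist _)
                rw [hq] at hpw
                exact (List.pairwise_cons.mp hpw).1 p hin
              omega
  -- where the found index j lies
  have hjcase : pvFindJ books fi i = -1 ∨
      (0 ≤ pvFindJ books fi i ∧ pvFindJ books fi i < (i : Int) ∧ (pvFindJ books fi i).toNat < i) := by
    rcases hq : stack1 with _ | ⟨q, rest⟩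
    · left; rw [← hj, hq]
    · right
      have hqmem : q ∈ stack := hsub q (by rw [hq]; exact List.mem_cons_self)
      obtain ⟨_, hq0, hqi⟩ := hmem q hqmem
      have hje : pvFindJ books fi i = q.2 := by rw [← hj, hq]
      rw [hje]; exact ⟨hq0, hqi, by omega⟩
  -- now unfold the two steps
  simp only [pvStepA, pvStepB, pvRel, pvInv]
  rw [← hst, ← hs1, hj]
  have hfieq : books.getD i 0 - (i : Int) = fi := by rw [hfi, pvFA]
  rw [hfieq]
  set j := pvFindJ books fi i with hjdef
  -- dp lookups agree
  have hget : (if 0 ≤ j then sA.2.1.getD j.toNat 0 else 0) = (if 0 ≤ j then sB.2.getD j.toNat 0 else 0) := by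
    rcases hjcase with hj1 | ⟨hj0, _, hjlt⟩
    · rw [hj1]; norm_num
    · rw [if_pos hj0, if_pos hj0, hdp, List.getD_append]
      omega
  set cur := (if books.getD i 0 - ((i : Int) - (j + 1)) < 0 then
          PySem.Int.floordiv (books.getD i 0 * (books.getD i 0 + 1)) 2
        else (if 0 ≤ j then sB.2.getD j.toNat 0 else 0) +
          PySem.Int.floordiv ((books.getD i 0 + (books.getD i 0 - ((i : Int) - (j + 1)))) * ((i : Int) - j)) 2) with hcurdef
  have hcur : (if books.getD i 0 - ((i : Int) - (j + 1)) < 0 then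
          PySem.Int.floordiv (books.getD i 0 * (books.getD i 0 + 1)) 2
        else (if 0 ≤ j then sA.2.1.getD j.toNat 0 else 0) +
          PySem.Int.floordiv ((books.getD i 0 + (books.getD i 0 - ((i : Int) - (j + 1)))) * ((i : Int) - j)) 2) = cur := by
    rw [hcurdef, hget]
  rw [hcur]
  have hset : sA.2.1.set i cur = (sB.2 ++ [cur]) ++ List.replicate (books.length - (i + 1)) 0 := by
    rw [hdp]
    have hrep : List.replicate (books.length - i) (0 : Int) =
        0 :: List.replicate (books.length - (i + 1)) 0 := by
      have : books.length - i = (books.length - (i + 1)) + 1 := by omega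
      rw [this, List.replicate_succ]
    rw [hrep, List.set_append_right _ _ (by omega)]
    simp [hlen]
  refine ⟨?_, ?_, ?_, ?_, ?_, ?_⟩
  · -- res
    rw [hres]
    congr 1
    rw [hset, List.getD_append _ _ _ _ (by simp; omega),
        List.getD_append_right _ _ _ _ (by omega)]
    simp [hlen]
  · rw [hset]
  · simp [hlen]
  · -- membership facts of the new stack
    intro p hp
    rcases List.mem_cons.mp hp with rfl | hp1
    · exact ⟨by simp, Int.natCast_nonneg i, by show (i:Int) < ((i+1:Nat):Int); exact_mod_cast Nat.lt_succ_self i⟩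
    · obtain ⟨h1, h2, h3⟩ := hmem p (hsub p hp1)
      exact ⟨h1, h2, by omega⟩
  · -- pairwise
    refine List.pairwise_cons.mpr ⟨?_, hpair.sublist (List.dropWhile_sublist _)⟩
    intro p hp1
    exact (hmem p (hsub p hp1)).2.2
  · -- coverage
    intro k hk
    by_cases hki : k = i
    · subst hki
      exact ⟨(fi, (k : Int)), List.mem_cons_self, le_refl _, le_of_eq hfi⟩
    · obtain ⟨p, hp, hkle, hple⟩ := hcov k (by omega)
      rcases hmemsplit p hp with hin | hin
      · refine ⟨(fi, (i : Int)), List.mem_cons_self, ?_, le_trans (htake p hin) hple⟩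
        show (k : Int) ≤ (i : Int)
        exact_mod_cast (by omega : k ≤ i)
      · exact ⟨p, List.mem_cons_of_mem _ hin, hkle, hple⟩

theorem pvFold_rel (books : List Int) (i : Nat) (hi : i ≤ books.length) :
    pvRel books i ((List.range i).foldl (pvStepA books) (0, List.replicate books.length 0, []))
      ((List.range i).foldl (pvStepB books) (0, [])) := by
  induction i with
  | zero =>
      unfold pvRel pvInv
      refine ⟨rfl, by simp, rfl, by simp, List.Pairwise.nil, by simp⟩
  | succ k ih =>
      rw [List.range_succ, List.foldl_append, List.foldl_append]
      simp only [List.foldl_cons, List.foldl_nil]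
      exact pvStep_rel books k (by omega) _ _ (ih (by omega))

-- ===== VERDICT (by name: the statement is the Claim_ definition above) =====
theorem maximumBooks_spec : Claim_equal_maximumBooks := by
  intro books _
  unfold Spec_maximumBooks maximumBooks maximumBooks_alt
  exact (pvFold_rel books books.length (le_refl _)).1
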